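-- pv_equiv track=rewrite | github.com/GES-compchem/GES-xml-converter | xml_parser.py | prune_equivalent_nodes
-- ===== SOURCE A (Python) =====
-- from typing import List
--
-- def prune_equivalent_nodes(strings: List[str], separator: str = "|") -> List[str]:
--     '''
--     Prune the string decomposition of the .xml tree to remove data attached to identical branches.
--     The data of equivalent branches are united in the same entry and divided by a '&' separator.
--
--         Parameters:
--         -----------
--             strings (list[str]): A list of strings containing the branches of the .xml tree
--             seseparator (str): Separator dividing the node fields (default: '|')
--
--         Returns:
--         --------
--             strings (list[str]): The pruned string decomposition of the .xml file
--     '''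
--
--     skip = []
--     pruned_strings = []
--
--     for a, string_a in enumerate(strings):
--
--         if a in skip:
--             continue
--
--         buffer = []
--         branch_a = separator.join(string_a.split(separator)[0:-1])
--
--         for b, string_b in enumerate(strings[a+1::]):
--
--             branch_b = separator.join(string_b.split(separator)[0:-1])
--
--             if branch_a == branch_b:
--                 if buffer == []:
--                     buffer.append(string_a.split(separator)[-1])
--                 buffer.append(string_b.split(separator)[-1])
--                 skip.append(a+b+1)
--
--         if buffer == []:
--             pruned_strings.append(string_a)
--         else:
--             pruned_strings.append(branch_a + separator + " & ".join(buffer))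
--
--     return pruned_strings
-- ===== SOURCE B (Python) =====
-- from typing import List
--
-- def prune_equivalent_nodes(strings: List[str], separator: str = "|") -> List[str]:
--     # One forward pass groups the trailing fields by branch in an insertion-ordered
--     # dict (and remembers the original string of each branch's first occurrence);
--     # a second pass over the dict emits one entry per branch.
--     first = {}
--     fields = {}
--     for s in strings:
--         parts = s.split(separator)
--         branch = separator.join(parts[:-1])
--         if branch not in first:
--             first[branch] = s
--         fields.setdefault(branch, []).append(parts[-1])
--     pruned_strings = []
--     for branch, fs in fields.items():
--         if len(fs) == 1:
--             pruned_strings.append(first[branch])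
--         else:
--             pruned_strings.append(branch + separator + " & ".join(fs))
--     return pruned_strings
-- ===== Notes on version B (the rewrite author's own statement) =====
-- stated objective: faster
-- what changed: Replaces A's nested pairwise rescans with a skip-index list by a single grouping pass into an insertion-ordered dict (branch -> trailing fields, plus the first-occurrence original) followed by one emit pass over the dict.
import Mathlib
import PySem

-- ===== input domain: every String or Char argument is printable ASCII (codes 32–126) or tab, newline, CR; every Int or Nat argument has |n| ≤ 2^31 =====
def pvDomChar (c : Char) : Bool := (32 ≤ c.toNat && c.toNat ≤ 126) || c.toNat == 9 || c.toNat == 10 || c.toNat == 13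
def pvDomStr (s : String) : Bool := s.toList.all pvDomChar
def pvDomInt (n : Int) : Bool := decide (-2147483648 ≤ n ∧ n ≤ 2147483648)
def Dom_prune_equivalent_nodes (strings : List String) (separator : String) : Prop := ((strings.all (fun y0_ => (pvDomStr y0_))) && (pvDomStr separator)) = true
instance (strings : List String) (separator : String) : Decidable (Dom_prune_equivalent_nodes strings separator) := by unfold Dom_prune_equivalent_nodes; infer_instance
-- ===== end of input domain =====

-- B replaces A's nested pairwise rescans + skip-index list by one grouping pass into an
-- insertion-ordered dict followed by one emit pass (objective: faster).

-- ===== PORT A =====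
-- shared transliteration of `s.split(separator)`, `separator.join(parts[:-1])`, `parts[-1]`:
-- PySem.Str.split? is none exactly when separator = "" (Python ValueError, excluded by Pre_),
-- so the .getD defaults below are never reached inside Pre_; split never returns [], so
-- `parts[-1]` never raises.
def pvParts (separator s : String) : List String := (PySem.Str.split? s separator).getD [s]

def pvBranch (separator s : String) : String :=
  PySem.Str.join separator (PySem.List.slice (pvParts separator s) (some 0) (some (-1)))

def pvField (separator s : String) : String :=
  (PySem.List.pyGet? (pvParts separator s) (-1)).getD ""

-- the body of A's inner `for b, string_b in enumerate(strings[a+1::])` loop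
def aInnerStep (separator : String) (a : Int) (string_a branch_a : String)
    (st : List String × List Int) (q : Int × String) : List String × List Int :=
  if pvBranch separator q.2 == branch_a then
    ((if st.1 == [] then st.1 ++ [pvField separator string_a] else st.1) ++ [pvField separator q.2],
     st.2 ++ [a + q.1 + 1])
  else st

-- A's emission after the inner loop: `if buffer == []: … else: …`
def aEmit (separator : String) (string_a branch_a : String)
    (inner : List String × List Int) (pruned : List String) : List Int × List String :=
  if inner.1 == [] then (inner.2, pruned ++ [string_a])
  else (inner.2, pruned ++ [branch_a ++ separator ++ PySem.Str.join " & " inner.1])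

-- the body of A's outer `for a, string_a in enumerate(strings)` loop; state = (skip, pruned_strings)
def aStep (strings : List String) (separator : String)
    (st : List Int × List String) (p : Int × String) : List Int × List String :=
  if p.1 ∈ st.1 then st
  else
    aEmit separator p.2 (pvBranch separator p.2)
      ((PySem.List.enumerate (PySem.List.slice strings (some (p.1 + 1)) none) 0).foldl
        (aInnerStep separator p.1 p.2 (pvBranch separator p.2)) ([], st.1)) st.2

def prune_equivalent_nodes (strings : List String) (separator : String) : List String :=
  ((PySem.List.enumerate strings 0).foldl (aStep strings separator) ([], [])).2

-- ===== PORT B =====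
-- `if branch not in first: first[branch] = s`
def bFirstStep (separator : String) (first : PySem.Dict String String) (s : String) :
    PySem.Dict String String :=
  if first.contains (pvBranch separator s) then first else first.insert (pvBranch separator s) s

-- `fields.setdefault(branch, []).append(parts[-1])`
def bFieldsStep (separator : String) (fields : PySem.Dict String (List String)) (s : String) :
    PySem.Dict String (List String) :=
  fields.modify (pvBranch separator s) [] (fun fs => fs ++ [pvField separator s])

def prune_equivalent_nodes_alt (strings : List String) (separator : String) : List String :=
  let st := strings.foldl (fun st s => (bFirstStep separator st.1 s, bFieldsStep separator st.2 s))
      (PySem.Dict.empty, PySem.Dict.empty)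
  st.2.items.foldl (fun pruned p =>
    if p.2.length == 1 then pruned ++ [st.1.getD p.1 ""]
    else pruned ++ [p.1 ++ separator ++ PySem.Str.join " & " p.2]) []

-- ===== PRECONDITION & SPEC =====
-- Pre_ excludes exactly the inputs on which Python's str.split raises ValueError
-- (empty separator with at least one string to split); A raises there (and so does B).
def Pre_prune_equivalent_nodes (strings : List String) (separator : String) : Prop :=
  strings = [] ∨ separator ≠ ""
instance (strings : List String) (separator : String) :
    Decidable (Pre_prune_equivalent_nodes strings separator) := by
  unfold Pre_prune_equivalent_nodes; infer_instance

def pvWitness_prune_equivalent_nodes : List String × String := (["a|1", "a|2", "b|3"], "|")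

def Spec_prune_equivalent_nodes (strings : List String) (separator : String) (out : List String) : Prop := out = prune_equivalent_nodes_alt strings separator
instance (strings : List String) (separator : String) (out : List String) : Decidable (Spec_prune_equivalent_nodes strings separator out) := by unfold Spec_prune_equivalent_nodes; infer_instance

-- ===== CLAIM (what is proved, stated in full; the proofs are below) =====
def Claim_equal_prune_equivalent_nodes : Prop := ∀ (strings : List String) (separator : String), Dom_prune_equivalent_nodes strings separator → Pre_prune_equivalent_nodes strings separator → Spec_prune_equivalent_nodes strings separator (prune_equivalent_nodes strings separator)

-- ===== LEMMAS AND PROOFS =====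

-- the common normal form both ports are reduced to: one output entry per distinct branch,
-- in first-occurrence order
def emitKey (separator : String) (strings : List String) (k : String) : String :=
  if (strings.filter (fun t => pvBranch separator t == k)).length == 1
  then (strings.filter (fun t => pvBranch separator t == k)).headD ""
  else k ++ separator ++
    PySem.Str.join " & " ((strings.filter (fun t => pvBranch separator t == k)).map (pvField separator))

def specOut (separator : String) (strings : List String) : List String :=
  (PySem.Set.ofList (strings.map (pvBranch separator))).map (emitKey separator strings)

def seenKeys (separator : String) (strings : List String) (i : Nat) : List String :=
  (strings.take i).map (pvBranch separator)

def remKeys (separator : String) (strings : List String) (i : Nat) : List String :=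
  PySem.Set.ofList (((strings.drop i).map (pvBranch separator)).filter
    (fun x => decide (x ∉ seenKeys separator strings i)))

def kIdx (separator : String) (strings : List String) (m : Nat) : String :=
  pvBranch separator (strings.getD m "")

-- ---- generic Set.ofList facts ----
lemma foldl_add_cons_notmem {α : Type} [BEq α] [LawfulBEq α] (A : List α) :
    ∀ (s : List α) (k : α), k ∉ A →
      List.foldl PySem.Set.add (k :: s) A = k :: List.foldl PySem.Set.add s A := by
  induction A with
  | nil => intro s k _; rfl
  | cons x A ih =>
    intro s k hk
    have hxk : x ≠ k := fun h => hk (by simp [h])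
    have hstep : PySem.Set.add (k :: s) x = k :: PySem.Set.add s x := by
      by_cases hx : x ∈ s <;> simp [PySem.Set.add, hx, hxk]
    simp only [List.foldl_cons, hstep]
    exact ih _ _ (fun h => hk (by simp [h]))

lemma foldl_add_filter_out {α : Type} [BEq α] [LawfulBEq α] (A : List α) :
    ∀ (s : List α) (k : α), k ∈ s →
      List.foldl PySem.Set.add s A
        = List.foldl PySem.Set.add s (A.filter (fun x => !(x == k))) := by
  induction A with
  | nil => intro s k _; rfl
  | cons x A ih =>
    intro s k hk
    by_cases hxk : x = k
    · subst hxk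
      have : PySem.Set.add s x = s := by simp [PySem.Set.add, hk]
      simp [List.foldl_cons, this, ih _ _ hk]
    · have hmem : k ∈ PySem.Set.add s x := by
        by_cases hx : x ∈ s <;> simp [PySem.Set.add, hx, hk]
      simp [List.foldl_cons, hxk, ih _ _ hmem]

lemma ofList_cons_split {α : Type} [BEq α] [LawfulBEq α] (k : α) (A : List α) :
    PySem.Set.ofList (k :: A)
      = k :: PySem.Set.ofList (A.filter (fun x => !(x == k))) := by
  rw [PySem.Set.ofList_eq_foldl, PySem.Set.ofList_eq_foldl, List.foldl_cons]
  have h0 : PySem.Set.add ([] : List α) k = [k] := by simp [PySem.Set.add]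
  rw [h0, foldl_add_filter_out A [k] k (by simp)]
  exact foldl_add_cons_notmem _ [] k (by simp)

-- ---- enumerate membership ----
lemma mem_enumerate {α : Type} (l : List α) :
    ∀ (b0 : Int) (q : Int × α), q ∈ PySem.List.enumerate l b0 ↔
      ∃ t : Nat, q.1 = b0 + (t : Int) ∧ l[t]? = some q.2 := by
  induction l with
  | nil => intro b0 q; simp [PySem.List.enumerate]
  | cons x l ih =>
    intro b0 q
    rw [show PySem.List.enumerate (x :: l) b0 = (b0, x) :: PySem.List.enumerate l (b0 + 1) from rfl,
        List.mem_cons, ih (b0 + 1) q]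
    constructor
    · rintro (h | ⟨t, ht1, ht2⟩)
      · exact ⟨0, by simp [h], by simp [h]⟩
      · exact ⟨t + 1, by push_cast at ht1 ⊢; omega, by simpa using ht2⟩
    · rintro ⟨t, ht1, ht2⟩
      cases t with
      | zero =>
        left
        simp only [List.getElem?_cons_zero, Option.some.injEq] at ht2
        simp only [Nat.cast_zero, add_zero] at ht1
        exact Prod.ext ht1 ht2.symm
      | succ t =>
        right
        exact ⟨t, by push_cast at ht1 ⊢; omega, by simpa using ht2⟩

-- ---- membership in the seen prefix ----
lemma mem_seenKeys (separator : String) (strings : List String) (i : Nat) (k : String) :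
    k ∈ seenKeys separator strings i ↔
      ∃ m : Nat, m < i ∧ ∃ s, strings[m]? = some s ∧ pvBranch separator s = k := by
  unfold seenKeys
  rw [List.mem_map]
  constructor
  · rintro ⟨s, hs, hks⟩
    rcases List.mem_iff_getElem?.1 hs with ⟨m, hm⟩
    have hmi : m < i := by
      by_contra h
      have : (strings.take i)[m]? = none := by
        apply List.getElem?_eq_none
        exact le_trans (List.length_take_le _ _) (by omega)
      simp [this] at hm
    refine ⟨m, hmi, s, ?_, hks⟩
    rwa [List.getElem?_take_of_lt hmi] at hm
  · rintro ⟨m, hmi, s, hms, hks⟩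
    refine ⟨s, ?_, hks⟩
    apply List.mem_iff_getElem?.2 ⟨m, ?_⟩
    rwa [List.getElem?_take_of_lt hmi]

-- ---- A's inner loop, characterised ----
lemma inner_spec (separator : String) (a : Int) (sa ba : String) (l : List String) :
    ∀ (b0 : Int) (buf : List String) (sk : List Int),
      (PySem.List.enumerate l b0).foldl (aInnerStep separator a sa ba) (buf, sk) =
        ((if l.filter (fun t => pvBranch separator t == ba) = [] then buf
          else (if buf = [] then [pvField separator sa] else buf)
            ++ (l.filter (fun t => pvBranch separator t == ba)).map (pvField separator)),
         sk ++ ((PySem.List.enumerate l b0).filter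
            (fun q => pvBranch separator q.2 == ba)).map (fun q => a + q.1 + 1)) := by
  induction l with
  | nil => intro b0 buf sk; simp [PySem.List.enumerate]
  | cons x l ih =>
    intro b0 buf sk
    rw [show PySem.List.enumerate (x :: l) b0 = (b0, x) :: PySem.List.enumerate l (b0 + 1) from rfl]
    by_cases hx : pvBranch separator x = ba
    · simp only [List.foldl_cons, List.filter_cons, hx, beq_self_eq_true, if_pos,
        aInnerStep, List.map_cons]
      rw [ih]
      by_cases hbuf : buf = [] <;>
        rcases hfl : l.filter (fun t => pvBranch separator t == ba) with _ | ⟨y, ys⟩ <;>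
          simp [hbuf, List.append_assoc]
    · have hxb : (pvBranch separator x == ba) = false := by simp [hx]
      simp only [List.foldl_cons, aInnerStep, hxb, List.filter_cons]
      rw [ih]
      simp

-- ---- B: the `first` dict looks up the first occurrence ----
lemma first_get? (separator : String) (l : List String) :
    ∀ (d : PySem.Dict String String) (k : String),
      (l.foldl (bFirstStep separator) d).get? k
        = (d.get? k).or ((l.filter (fun s => pvBranch separator s == k)).head?) := by
  induction l with
  | nil => intro d k; simp
  | cons s l ih =>
    intro d k
    by_cases hc : d.contains (pvBranch separator s)
    · have hstep : bFirstStep separator d s = d := by simp [bFirstStep, hc]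
      rw [List.foldl_cons, hstep, ih]
      by_cases hk : pvBranch separator s = k
      · have hsome : (d.get? k).isSome := by
          rw [← hk]; rw [PySem.Dict.contains_eq_isSome_get?] at hc; exact hc
        rcases Option.isSome_iff_exists.1 hsome with ⟨v, hv⟩
        simp [hv, hk]
      · simp [hk]
    · have hstep : bFirstStep separator d s = d.insert (pvBranch separator s) s := by
        simp [bFirstStep, hc]
      rw [List.foldl_cons, hstep, ih]
      by_cases hk : pvBranch separator s = k
      · have hnone : d.get? k = none := by
          rw [← hk]
          rw [PySem.Dict.contains_eq_isSome_get?] at hc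
          exact Option.not_isSome_iff_eq_none.1 (by simp [hc])
        rw [PySem.Dict.get?_insert, if_pos hk.symm]
        simp [hnone, hk]
      · rw [PySem.Dict.get?_insert, if_neg (fun h => hk h.symm)]
        simp [hk]

-- ---- B: the `fields` dict groups the trailing fields ----
lemma fields_getD (separator : String) (strings : List String) (k : String) :
    (strings.foldl (bFieldsStep separator) PySem.Dict.empty).getD k []
      = (strings.filter (fun s => pvBranch separator s == k)).map (pvField separator) := by
  have hfold : strings.foldl (bFieldsStep separator) PySem.Dict.empty
      = (strings.map (fun s => (pvBranch separator s, pvField separator s))).foldl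
          (fun d p => d.modify p.1 [] (fun fs => fs ++ [p.2])) PySem.Dict.empty := by
    rw [List.foldl_map]
    rfl
  rw [hfold, PySem.Dict.getD_foldl_modify_append]
  rw [List.filter_map, List.map_map]
  simp [Function.comp_def]

lemma keys_fields (separator : String) (strings : List String) :
    (strings.foldl (bFieldsStep separator) PySem.Dict.empty).keys
      = PySem.Set.ofList (strings.map (pvBranch separator)) := by
  have := PySem.Dict.keys_foldl_modify_key (l := strings) (key := pvBranch separator)
      (d0 := ([] : List String))
      (f := fun _ s => fun fs => fs ++ [pvField separator s]) (d := PySem.Dict.empty)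
  rw [show (fun (d : PySem.Dict String (List String)) (x : String) =>
        d.modify (pvBranch separator x) [] ((fun _ s => fun fs => fs ++ [pvField separator s]) d x))
      = bFieldsStep separator from rfl] at this
  rw [this, PySem.Dict.keys_empty]
  rw [PySem.Set.ofList_eq_foldl]
  rfl

lemma nodup_keys_fields (separator : String) (strings : List String) :
    (strings.foldl (bFieldsStep separator) PySem.Dict.empty).keys.Nodup := by
  have := PySem.Dict.nodup_keys_foldl_modify_key (l := strings) (key := pvBranch separator)
      (d0 := ([] : List String))
      (f := fun _ s => fun fs => fs ++ [pvField separator s]) (d := PySem.Dict.empty)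
      PySem.Dict.nodup_keys_empty
  rwa [show (fun (d : PySem.Dict String (List String)) (x : String) =>
        d.modify (pvBranch separator x) [] ((fun _ s => fun fs => fs ++ [pvField separator s]) d x))
      = bFieldsStep separator from rfl] at this

-- ---- B equals the normal form ----
lemma B_eq_spec (strings : List String) (separator : String) :
    prune_equivalent_nodes_alt strings separator = specOut separator strings := by
  suffices h : ∀ (fD : PySem.Dict String String) (gD : PySem.Dict String (List String)),
      fD = strings.foldl (bFirstStep separator) PySem.Dict.empty →
      gD = strings.foldl (bFieldsStep separator) PySem.Dict.empty →
      List.foldl (fun pruned p =>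
          if p.2.length == 1 then pruned ++ [fD.getD p.1 ""]
          else pruned ++ [p.1 ++ separator ++ PySem.Str.join " & " p.2]) [] gD.items
        = specOut separator strings by
    have hpair : strings.foldl
        (fun st s => (bFirstStep separator st.1 s, bFieldsStep separator st.2 s))
        (PySem.Dict.empty, PySem.Dict.empty)
        = (strings.foldl (bFirstStep separator) PySem.Dict.empty,
           strings.foldl (bFieldsStep separator) PySem.Dict.empty) :=
      PySem.List.foldl_prod_mk (bFirstStep separator) (bFieldsStep separator) strings _ _
    show List.foldl _ []
        ((strings.foldl (fun st s => (bFirstStep separator st.1 s, bFieldsStep separator st.2 s))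
          (PySem.Dict.empty, PySem.Dict.empty)).2.items) = specOut separator strings
    rw [hpair]
    exact h _ _ rfl rfl
  intro fD gD hfD hgD
  have hemit : ∀ (acc : List String) (p : String × List String),
      (if p.2.length == 1 then acc ++ [fD.getD p.1 ""]
       else acc ++ [p.1 ++ separator ++ PySem.Str.join " & " p.2])
      = acc ++ [if p.2.length == 1 then fD.getD p.1 ""
                else p.1 ++ separator ++ PySem.Str.join " & " p.2] := by
    intro acc p
    by_cases h : (p.2.length == 1) = true <;> simp [h]
  have h1 := PySem.List.foldl_congr_mem (l := gD.items) (init := ([] : List String))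
      (f := fun pruned p =>
        if p.2.length == 1 then pruned ++ [fD.getD p.1 ""]
        else pruned ++ [p.1 ++ separator ++ PySem.Str.join " & " p.2])
      (g := fun acc p =>
        acc ++ [if p.2.length == 1 then fD.getD p.1 ""
                else p.1 ++ separator ++ PySem.Str.join " & " p.2])
      (fun acc p _ => hemit acc p)
  rw [h1, PySem.List.foldl_append_singleton_eq_map]
  rw [hgD, PySem.Dict.items_eq_map_keys _ (nodup_keys_fields separator strings) [],
      List.map_map, keys_fields]
  unfold specOut
  apply List.map_congr_left
  intro k hk
  have hkmem : k ∈ strings.map (pvBranch separator) := (PySem.Set.mem_ofList _ _).1 hk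
  rcases List.mem_map.1 hkmem with ⟨s0, hs0, hks0⟩
  simp only [Function.comp_def, fields_getD, List.length_map, emitKey]
  by_cases hlen : ((List.filter (fun t => pvBranch separator t == k) strings).length == 1) = true
  · simp only [hlen, if_pos]
    rw [PySem.Dict.getD_eq_get?_getD, hfD, first_get? separator strings PySem.Dict.empty k]
    rcases hflt : List.filter (fun t => pvBranch separator t == k) strings with _ | ⟨a, t⟩ <;>
      simp [hflt]
  · simp only [hlen, Bool.false_eq_true, if_neg, not_false_iff]

-- ---- drop facts ----
lemma drop_eq_cons_facts {strings l' : List String} {s : String} {i : Nat}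
    (hl : strings.drop i = s :: l') :
    strings[i]? = some s ∧ strings.drop (i + 1) = l' := by
  constructor
  · have h0 : (strings.drop i)[0]? = some s := by rw [hl]; rfl
    rwa [List.getElem?_drop, Nat.add_zero] at h0
  · have h1 : (strings.drop i).tail = l' := by rw [hl]; rfl
    rwa [List.tail_drop] at h1

lemma seenKeys_succ (separator : String) (strings : List String) (i : Nat) (s : String)
    (hsi : strings[i]? = some s) :
    seenKeys separator strings (i + 1) = seenKeys separator strings i ++ [pvBranch separator s] := by
  unfold seenKeys
  rw [List.take_add_one, hsi]
  simp

-- ---- remKeys recursion ----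
lemma remKeys_skip (separator : String) (strings : List String) {i : Nat} {s : String}
    {l' : List String} (hl : strings.drop i = s :: l')
    (hmem : pvBranch separator s ∈ seenKeys separator strings i) :
    remKeys separator strings i = remKeys separator strings (i + 1) := by
  obtain ⟨hsi, hl'⟩ := drop_eq_cons_facts hl
  unfold remKeys
  rw [hl, hl', List.map_cons, List.filter_cons]
  simp only [hmem, not_true_eq_false, decide_false, Bool.false_eq_true, if_neg, not_false_iff]
  apply congrArg
  apply List.filter_congr
  intro x hx
  rw [seenKeys_succ separator strings i s hsi]
  by_cases hxe : x = pvBranch separator s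
  · subst hxe; simp [hmem]
  · simp [List.mem_append, hxe]

lemma remKeys_cons (separator : String) (strings : List String) {i : Nat} {s : String}
    {l' : List String} (hl : strings.drop i = s :: l')
    (hnot : pvBranch separator s ∉ seenKeys separator strings i) :
    remKeys separator strings i = pvBranch separator s :: remKeys separator strings (i + 1) := by
  obtain ⟨hsi, hl'⟩ := drop_eq_cons_facts hl
  unfold remKeys
  rw [hl, hl', List.map_cons, List.filter_cons]
  simp only [hnot, not_false_iff, decide_true, if_pos]
  rw [ofList_cons_split, List.filter_filter]
  apply congrArg
  apply congrArg
  apply List.filter_congr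
  intro x hx
  rw [seenKeys_succ separator strings i s hsi]
  by_cases hxe : x = pvBranch separator s
  · subst hxe; simp
  · simp [List.mem_append, hxe]

-- ---- the whole-list group of a first occurrence ----
lemma group_decomp (separator : String) (strings : List String) {i : Nat} {s : String}
    {l' : List String} (hl : strings.drop i = s :: l')
    (hnot : pvBranch separator s ∉ seenKeys separator strings i) :
    strings.filter (fun t => pvBranch separator t == pvBranch separator s)
      = s :: l'.filter (fun t => pvBranch separator t == pvBranch separator s) := by
  conv_lhs => rw [← List.take_append_drop i strings]
  rw [List.filter_append, hl, List.filter_cons]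
  have h1 : (strings.take i).filter (fun t => pvBranch separator t == pvBranch separator s) = [] := by
    rw [List.filter_eq_nil_iff]
    intro x hx hkey
    exact hnot (List.mem_map.2 ⟨x, hx, by simpa using hkey⟩)
  rw [h1]
  simp

-- ---- the indices the inner loop appends to skip ----
lemma mem_newIdx (separator : String) (strings : List String) {i : Nat} {s : String}
    {l' : List String} (hl' : strings.drop (i + 1) = l') (hsi : strings[i]? = some s) (j : Int) :
    (j ∈ ((PySem.List.enumerate l' 0).filter
        (fun q => pvBranch separator q.2 == pvBranch separator s)).map
        (fun q => (i : Int) + q.1 + 1))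
      ↔ ∃ t : Nat, j = (t : Int) ∧ i < t ∧ t < strings.length ∧
          kIdx separator strings t = kIdx separator strings i := by
  have hki : kIdx separator strings i = pvBranch separator s := by
    unfold kIdx; rw [List.getD_eq_getElem?_getD, hsi]; rfl
  obtain ⟨hii, -⟩ := List.getElem?_eq_some_iff.1 hsi
  have hlen : l'.length = strings.length - (i + 1) := by rw [← hl', List.length_drop]
  rw [List.mem_map]
  constructor
  · rintro ⟨q, hq, hj⟩
    rcases List.mem_filter.1 hq with ⟨hqe, hqb⟩
    rcases (mem_enumerate l' 0 q).1 hqe with ⟨t', ht'1, ht'2⟩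
    obtain ⟨htn', -⟩ := List.getElem?_eq_some_iff.1 ht'2
    refine ⟨i + 1 + t', ?_, by omega, by omega, ?_⟩
    · rw [← hj, ht'1]; push_cast; ring
    · have hq2 : strings[i + 1 + t']? = some q.2 := by
        rw [show i + 1 + t' = (i + 1) + t' from rfl, ← List.getElem?_drop, hl', ht'2]
      rw [hki]
      unfold kIdx
      rw [List.getD_eq_getElem?_getD, hq2]
      simpa using hqb
  · rintro ⟨t, hj, hit, htn, hkt⟩
    obtain ⟨st, hst⟩ : ∃ st, strings[t]? = some st := ⟨strings[t], List.getElem?_eq_getElem htn⟩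
    have ht' : (i + 1) + (t - (i + 1)) = t := by omega
    refine ⟨((((t - (i + 1) : Nat)) : Int), st), ?_, ?_⟩
    · apply List.mem_filter.2
      constructor
      · apply (mem_enumerate l' 0 _).2 ⟨t - (i + 1), by simp, ?_⟩
        rw [← hl', List.getElem?_drop, ht', hst]
      · show (pvBranch separator st == pvBranch separator s) = true
        have hkst : kIdx separator strings t = pvBranch separator st := by
          unfold kIdx; rw [List.getD_eq_getElem?_getD, hst]; rfl
        simp [← hkst, hkt, hki]
    · rw [hj]
      push_cast [Nat.cast_sub (by omega : i + 1 ≤ t)]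
      ring

-- ===== A's outer loop, by induction over the remaining suffix =====
lemma outer_spec (strings : List String) (separator : String) :
    ∀ (l : List String) (i : Nat), strings.drop i = l →
    ∀ (sk : List Int) (pr : List String),
      (∀ j : Int, j ∈ sk ↔ ∃ t m : Nat, j = (t : Int) ∧ m < i ∧ m < t ∧ t < strings.length ∧
          kIdx separator strings m = kIdx separator strings t) →
      ((PySem.List.enumerate l (i : Int)).foldl (aStep strings separator) (sk, pr)).2
        = pr ++ (remKeys separator strings i).map (emitKey separator strings) := by
  intro l
  induction l with
  | nil =>
    intro i hl sk pr _
    have hrem : remKeys separator strings i = [] := by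
      unfold remKeys; rw [hl]; rfl
    rw [show PySem.List.enumerate ([] : List String) (i : Int) = [] from rfl]
    simp [hrem]
  | cons s l' ih =>
    intro i hl sk pr Hsk
    obtain ⟨hsi, hl'⟩ := drop_eq_cons_facts hl
    obtain ⟨hin, -⟩ := List.getElem?_eq_some_iff.1 hsi
    have hki : kIdx separator strings i = pvBranch separator s := by
      unfold kIdx; rw [List.getD_eq_getElem?_getD, hsi]; rfl
    rw [show PySem.List.enumerate (s :: l') (i : Int)
        = ((i : Int), s) :: PySem.List.enumerate l' ((i : Int) + 1) from rfl, List.foldl_cons]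
    have hcast : ((i : Int)) + 1 = (((i + 1 : Nat)) : Int) := by push_cast; ring
    have hmem_iff : ((i : Int) ∈ sk) ↔
        ∃ m : Nat, m < i ∧ kIdx separator strings m = kIdx separator strings i := by
      rw [Hsk ((i : Int))]
      constructor
      · rintro ⟨t, m, hjt, hmi, hmt, htn, hk⟩
        have hti : t = i := by exact_mod_cast hjt.symm
        subst hti; exact ⟨m, hmi, hk⟩
      · rintro ⟨m, hmi, hk⟩
        exact ⟨i, m, rfl, hmi, hmi, hin, hk⟩
    by_cases hskip : ∃ m : Nat, m < i ∧ kIdx separator strings m = kIdx separator strings i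
    · -- this index was already grouped into an earlier entry
      have hstep : aStep strings separator (sk, pr) ((i : Int), s) = (sk, pr) := by
        simp only [aStep]
        rw [if_pos (hmem_iff.2 hskip)]
      have Hsk' : ∀ j : Int, j ∈ sk ↔ ∃ t m : Nat, j = (t : Int) ∧ m < i + 1 ∧ m < t ∧
          t < strings.length ∧ kIdx separator strings m = kIdx separator strings t := by
        intro j
        rw [Hsk j]
        constructor
        · rintro ⟨t, m, h1, h2, h3, h4, h5⟩; exact ⟨t, m, h1, by omega, h3, h4, h5⟩
        · rintro ⟨t, m, h1, h2, h3, h4, h5⟩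
          by_cases hmi : m < i
          · exact ⟨t, m, h1, hmi, h3, h4, h5⟩
          · have hm : m = i := by omega
            subst hm
            obtain ⟨m0, hm0, hk0⟩ := hskip
            exact ⟨t, m0, h1, hm0, by omega, h4, by rw [hk0, h5]⟩
      have hsmem : pvBranch separator s ∈ seenKeys separator strings i := by
        obtain ⟨m, hmi, hk⟩ := hskip
        have hmn : m < strings.length := by omega
        apply (mem_seenKeys separator strings i _).2
        refine ⟨m, hmi, strings[m], List.getElem?_eq_getElem hmn, ?_⟩
        have hkm : kIdx separator strings m = pvBranch separator strings[m] := by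
          unfold kIdx; rw [List.getD_eq_getElem?_getD, List.getElem?_eq_getElem hmn]; rfl
        rw [← hkm, hk, hki]
      rw [hstep, hcast, ih (i + 1) hl' sk pr Hsk',
          remKeys_skip separator strings hl hsmem]
    · -- first occurrence of this branch
      have hnotmem : (i : Int) ∉ sk := fun h => hskip (hmem_iff.1 h)
      have hnot : pvBranch separator s ∉ seenKeys separator strings i := by
        intro hmem
        rcases (mem_seenKeys separator strings i _).1 hmem with ⟨m, hmi, sm, hsm, hkm⟩
        apply hskip
        refine ⟨m, hmi, ?_⟩
        unfold kIdx
        rw [List.getD_eq_getElem?_getD, List.getD_eq_getElem?_getD, hsm, hsi]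
        exact hkm
      have hslice : PySem.List.slice strings (some ((i : Int) + 1)) none = l' := by
        rw [hcast, PySem.List.slice_from strings (Int.natCast_nonneg _)]
        simpa using hl'
      have hg := group_decomp separator strings hl hnot
      have hrem := remKeys_cons separator strings hl hnot
      have Hsk'' : ∀ j : Int, j ∈ sk ++ ((PySem.List.enumerate l' 0).filter
            (fun q => pvBranch separator q.2 == pvBranch separator s)).map
            (fun q => (i : Int) + q.1 + 1) ↔
          ∃ t m : Nat, j = (t : Int) ∧ m < i + 1 ∧ m < t ∧ t < strings.length ∧
            kIdx separator strings m = kIdx separator strings t := by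
        intro j
        rw [List.mem_append, Hsk j, mem_newIdx separator strings hl' hsi j]
        constructor
        · rintro (⟨t, m, h1, h2, h3, h4, h5⟩ | ⟨t, h1, h2, h3, h4⟩)
          · exact ⟨t, m, h1, by omega, h3, h4, h5⟩
          · exact ⟨t, i, h1, by omega, h2, h3, h4.symm⟩
        · rintro ⟨t, m, h1, h2, h3, h4, h5⟩
          by_cases hmi : m < i
          · exact Or.inl ⟨t, m, h1, hmi, h3, h4, h5⟩
          · have hm : m = i := by omega
            subst hm
            exact Or.inr ⟨t, h1, h3, h4, h5.symm⟩
      by_cases hMe : l'.filter (fun t => pvBranch separator t == pvBranch separator s) = []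
      · -- lone branch: A re-emits the original string
        have hstep : aStep strings separator (sk, pr) ((i : Int), s)
            = (sk ++ ((PySem.List.enumerate l' 0).filter
                (fun q => pvBranch separator q.2 == pvBranch separator s)).map
                (fun q => (i : Int) + q.1 + 1),
               pr ++ [s]) := by
          simp only [aStep]
          rw [if_neg hnotmem, hslice, inner_spec]
          rw [if_pos hMe]
          simp [aEmit]
        have hE : emitKey separator strings (pvBranch separator s) = s := by
          unfold emitKey
          rw [hg, hMe]
          simp
        rw [hstep, hcast, ih (i + 1) hl' _ _ Hsk'', hrem]
        simp [hE]
      · -- a group: A emits branch ++ separator ++ " & ".join(fields)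
        have hstep : aStep strings separator (sk, pr) ((i : Int), s)
            = (sk ++ ((PySem.List.enumerate l' 0).filter
                (fun q => pvBranch separator q.2 == pvBranch separator s)).map
                (fun q => (i : Int) + q.1 + 1),
               pr ++ [pvBranch separator s ++ separator ++ PySem.Str.join " & "
                 ([pvField separator s] ++ (l'.filter
                   (fun t => pvBranch separator t == pvBranch separator s)).map
                     (pvField separator))]) := by
          simp only [aStep]
          rw [if_neg hnotmem, hslice, inner_spec]
          rw [if_neg hMe, if_pos rfl]
          simp [aEmit]
        have hE : emitKey separator strings (pvBranch separator s)
            = pvBranch separator s ++ separator ++ PySem.Str.join " & "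
                ([pvField separator s] ++ (l'.filter
                  (fun t => pvBranch separator t == pvBranch separator s)).map
                    (pvField separator)) := by
          unfold emitKey
          rw [hg]
          have hlen0 : (l'.filter
              (fun t => pvBranch separator t == pvBranch separator s)).length ≠ 0 :=
            fun h => hMe (List.length_eq_zero_iff.1 h)
          have hcond : ((s :: l'.filter
              (fun t => pvBranch separator t == pvBranch separator s)).length == 1) = false := by
            simp only [List.length_cons, beq_eq_false_iff_ne]
            omega
          rw [hcond]
          simp
        rw [hstep, hcast, ih (i + 1) hl' _ _ Hsk'', hrem]
        simp [hE]

-- ---- A equals the normal form ----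
lemma A_eq_spec (strings : List String) (separator : String) :
    prune_equivalent_nodes strings separator = specOut separator strings := by
  unfold prune_equivalent_nodes
  have h := outer_spec strings separator strings 0 (by simp) [] []
      (by intro j; simp)
  simp only [Nat.cast_zero] at h
  rw [h]
  unfold specOut remKeys seenKeys
  simp

-- ===== VERDICT (by name: the statement is the Claim_ definition above) =====
theorem prune_equivalent_nodes_spec : Claim_equal_prune_equivalent_nodes := by
  intro strings separator _ _
  unfold Spec_prune_equivalent_nodes
  rw [A_eq_spec, B_eq_spec]
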